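-- pv_equiv track=rewrite | github.com/PrinceSinghhub/GFG-Questions | Print Diagonally.py | downwardDigonal
-- ===== SOURCE A (Python) =====
-- def downwardDigonal(N, A):
--     # code here
--
--     vis = []
--
--     rans = []
--
--     for i in range(N):
--
--         c = []
--
--         for j in range(N):
--             c.append(-1)
--
--         vis.append(c)
--
--     def mark(i, j, N, ans):
--
--         while (i >= 0 and j >= 0 and i < N and j < N):
--             ans.append(A[i][j])
--
--             vis[i][j] = 1
--
--             i = i + 1
--
--             j = j - 1
--
--         return ans
--
--     for i in range(N):
--
--         for j in range(N):
--
--             if (vis[i][j] == -1):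
--                 a = mark(i, j, N, [])
--
--                 rans += a
--
--     return rans
-- ===== SOURCE B (Python) =====
-- def downwardDigonal(N, A):
--     res = []
--     for s in range(2 * N - 1):
--         for i in range(max(0, s - N + 1), min(N - 1, s) + 1):
--             res.append(A[i][s - i])
--     return res
-- ===== Notes on version B (the rewrite author's own statement) =====
-- stated objective: simpler
-- what changed: Replaces the visited matrix and the repeated down-left walks triggered by a row-major scan with a direct double loop over anti-diagonal sums s = i+j, indexing each diagonal top-to-bottom; the O(N^2) vis bookkeeping disappears.
import Mathlib
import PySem

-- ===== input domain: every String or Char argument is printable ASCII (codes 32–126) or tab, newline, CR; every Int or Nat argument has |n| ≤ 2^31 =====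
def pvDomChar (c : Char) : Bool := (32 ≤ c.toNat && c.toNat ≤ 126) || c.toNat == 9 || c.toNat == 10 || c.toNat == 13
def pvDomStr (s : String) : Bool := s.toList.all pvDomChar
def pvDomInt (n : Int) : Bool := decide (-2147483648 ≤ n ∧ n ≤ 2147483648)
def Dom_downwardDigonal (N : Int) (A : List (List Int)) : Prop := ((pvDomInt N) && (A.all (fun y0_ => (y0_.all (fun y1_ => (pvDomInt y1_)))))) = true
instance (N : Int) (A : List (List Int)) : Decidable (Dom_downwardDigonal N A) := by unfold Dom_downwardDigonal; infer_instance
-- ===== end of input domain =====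

-- B replaces A's visited matrix and repeated down-left walks with a direct double
-- loop over anti-diagonal sums s = i + j (simpler; same O(N^2) cost).


-- ===== PORT A =====
-- M[i][j]; the default is never reached on inputs admitted by Pre_ (Python would raise there)
def pvCell (M : List (List Int)) (i j : Int) : Int :=
  (PySem.List.pyGet? ((PySem.List.pyGet? M i).getD []) j).getD 0

-- vis[i][j] = 1 (indices are nonnegative and in range whenever executed)
def pvSet1 (M : List (List Int)) (i j : Int) : List (List Int) :=
  M.set i.toNat ((M.getD i.toNat []).set j.toNat 1)

-- the inner 'mark' while-loop of A; returns (ans, vis)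
def markA (A : List (List Int)) (N : Int) (i j : Int) (ans : List Int)
    (vis : List (List Int)) : List Int × List (List Int) :=
  if _h : 0 ≤ i ∧ 0 ≤ j ∧ i < N ∧ j < N then
    markA A N (i + 1) (j - 1) (ans ++ [pvCell A i j]) (pvSet1 vis i j)
  else (ans, vis)
termination_by (N - i).toNat
decreasing_by omega

def downwardDigonal (N : Int) (A : List (List Int)) : List Int :=
  -- build vis: N rows of N entries -1
  let vis0 : List (List Int) :=
    (PySem.List.pyRange 0 N 1).foldl
      (fun acc _ => acc ++ [(PySem.List.pyRange 0 N 1).foldl (fun c _ => c ++ [(-1 : Int)]) []]) []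
  -- row-major scan; state = (vis, rans)
  let st :=
    (PySem.List.pyRange 0 N 1).foldl (fun st i =>
      (PySem.List.pyRange 0 N 1).foldl (fun st j =>
        if pvCell st.1 i j == -1 then
          let p := markA A N i j [] st.1
          (p.2, st.2 ++ p.1)
        else st) st) (vis0, ([] : List Int))
  st.2

-- ===== PORT B =====
def downwardDigonal_alt (N : Int) (A : List (List Int)) : List Int :=
  (PySem.List.pyRange 0 (2 * N - 1) 1).flatMap (fun s =>
    (PySem.List.pyRange (max 0 (s - N + 1)) (min (N - 1) s + 1) 1).map (fun i => pvCell A i (s - i)))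

-- ===== PRECONDITION & SPEC =====
-- Pre_ excludes exactly the inputs on which Python A raises an IndexError:
-- fewer than N rows, or one of the first N rows shorter than N.
def Pre_downwardDigonal (N : Int) (A : List (List Int)) : Prop :=
  N ≤ (A.length : Int) ∧ ∀ r ∈ A.take N.toNat, N ≤ (r.length : Int)
instance (N : Int) (A : List (List Int)) : Decidable (Pre_downwardDigonal N A) := by
  unfold Pre_downwardDigonal; infer_instance

def pvWitness_downwardDigonal : Int × List (List Int) := (2, [[1, 2], [3, 4]])

def Spec_downwardDigonal (N : Int) (A : List (List Int)) (out : List Int) : Prop := out = downwardDigonal_alt N A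
instance (N : Int) (A : List (List Int)) (out : List Int) : Decidable (Spec_downwardDigonal N A out) := by unfold Spec_downwardDigonal; infer_instance

-- ===== CLAIM (what is proved, stated in full; the proofs are below) =====
def Claim_equal_downwardDigonal : Prop := ∀ (N : Int) (A : List (List Int)), Dom_downwardDigonal N A → Pre_downwardDigonal N A → Spec_downwardDigonal N A (downwardDigonal N A)

-- ===== LEMMAS AND PROOFS =====

def pvShape (N : Int) (vis : List (List Int)) : Prop :=
  vis.length = N.toNat ∧ ∀ row ∈ vis, row.length = N.toNat

theorem pvCell_eq' (M : List (List Int)) (r c : Int) (hr : 0 ≤ r) (hrN : r.toNat < M.length)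
    (hc : 0 ≤ c) (hcN : c.toNat < (M.getD r.toNat []).length) :
    pvCell M r c = (M.getD r.toNat []).getD c.toNat 0 := by
  have h2 : c.toNat < (M[r.toNat]).length := by
    simpa [List.getD, List.getElem?_eq_getElem hrN] using hcN
  unfold pvCell
  rw [PySem.List.pyGet?_of_nonneg M hr, List.getElem?_eq_getElem hrN]
  simp only [Option.getD_some]
  rw [PySem.List.pyGet?_of_nonneg _ hc, List.getElem?_eq_getElem h2]
  simp [List.getD, List.getElem?_eq_getElem hrN, List.getElem?_eq_getElem h2]

theorem pvShape_pvSet1 (N : Int) (vis : List (List Int)) (hs : pvShape N vis)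
    (i j : Int) (hi : 0 ≤ i) (hiN : i < N) : pvShape N (pvSet1 vis i j) := by
  obtain ⟨h1, h2⟩ := hs
  have hiT : i.toNat < vis.length := by omega
  refine ⟨by simp [pvSet1, h1], ?_⟩
  intro row hrow
  rcases List.mem_or_eq_of_mem_set hrow with h | h
  · exact h2 _ h
  · subst h
    rw [List.length_set, List.getD_eq_getElem _ _ hiT]
    exact h2 _ (List.getElem_mem _)

theorem pvCell_pvSet1 (N : Int) (vis : List (List Int)) (hs : pvShape N vis)
    (i j r c : Int) (hi : 0 ≤ i) (hiN : i < N) (hj : 0 ≤ j) (hjN : j < N)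
    (hr : 0 ≤ r) (hrN : r < N) (hc : 0 ≤ c) (hcN : c < N) :
    pvCell (pvSet1 vis i j) r c = if r = i ∧ c = j then 1 else pvCell vis r c := by
  obtain ⟨h1, h2⟩ := hs
  have hiT : i.toNat < vis.length := by omega
  have hrT : r.toNat < vis.length := by omega
  have hrowi : (vis.getD i.toNat []).length = N.toNat := by
    rw [List.getD_eq_getElem _ _ hiT]; exact h2 _ (List.getElem_mem _)
  have hrowr : (vis.getD r.toNat []).length = N.toNat := by
    rw [List.getD_eq_getElem _ _ hrT]; exact h2 _ (List.getElem_mem _)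
  have hsetlen : (pvSet1 vis i j).length = vis.length := by simp [pvSet1]
  have hgetset : (pvSet1 vis i j).getD r.toNat []
      = if i.toNat = r.toNat then (vis.getD i.toNat []).set j.toNat 1 else vis.getD r.toNat [] := by
    unfold pvSet1
    rw [List.getD_eq_getElem _ _ (by rw [List.length_set]; exact hrT), List.getElem_set]
    split_ifs
    · rfl
    · rw [List.getD_eq_getElem _ _ hrT]
  have hb : c.toNat < ((pvSet1 vis i j).getD r.toNat []).length := by
    rw [hgetset]; split_ifs
    · rw [List.length_set, hrowi]; omega
    · rw [hrowr]; omega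
  rw [pvCell_eq' (pvSet1 vis i j) r c hr (by rw [hsetlen]; exact hrT) hc hb,
      pvCell_eq' vis r c hr hrT hc (by rw [hrowr]; omega), hgetset]
  by_cases hri : i.toNat = r.toNat
  · rw [if_pos hri]
    have hri' : r = i := by omega
    subst hri'
    rw [List.getD_eq_getElem _ _ (by rw [List.length_set, hrowi]; omega), List.getElem_set]
    by_cases hcj : j.toNat = c.toNat
    · rw [if_pos hcj]
      have : c = j := by omega
      simp [this]
    · rw [if_neg hcj]
      have hne : ¬(c = j) := by omega
      rw [if_neg (by tauto)]
      exact (List.getD_eq_getElem _ _ (by rw [hrowi]; omega)).symm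
  · rw [if_neg hri]
    have : ¬(r = i) := by omega
    rw [if_neg (by tauto)]

def pvMidInv (N t i : Int) (vis : List (List Int)) : Prop :=
  pvShape N vis ∧ ∀ r c : Int, 0 ≤ r → r < N → 0 ≤ c → c < N →
    pvCell vis r c = if r + c < t ∨ (r + c = t ∧ r < i) then 1 else -1

theorem pvMidInv_congr (N t a b : Int) (vis : List (List Int)) (h : pvMidInv N t a vis)
    (hab : ∀ r, 0 ≤ r → r < N → r ≤ t → (r < a ↔ r < b)) : pvMidInv N t b vis := by
  refine ⟨h.1, fun r c hr hrN hc hcN => ?_⟩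
  rw [h.2 r c hr hrN hc hcN]
  by_cases h1 : r + c < t
  · simp [h1]
  · by_cases h2 : r + c = t
    · have := hab r hr hrN (by omega)
      split_ifs <;> tauto
    · simp [h1, h2]

theorem markA_run (A : List (List Int)) (N t : Int) :
    ∀ (fuel : Nat) (i : Int) (ans : List Int) (vis : List (List Int)),
      (N - i).toNat ≤ fuel → 0 ≤ i → t - i < N → pvMidInv N t i vis →
      ∃ vis', markA A N i (t - i) ans vis
          = (ans ++ (PySem.List.pyRange i (min (N - 1) t + 1) 1).map (fun r => pvCell A r (t - r)), vis')
        ∧ pvMidInv N t (min (N - 1) t + 1) vis' := by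
  intro fuel
  induction fuel with
  | zero =>
    intro i ans vis hfuel h0 hjN hmid
    have hiN : N ≤ i := by omega
    refine ⟨vis, ?_, ?_⟩
    · rw [markA, dif_neg (by omega)]
      rw [PySem.List.pyRange_one_eq_nil (by omega)]
      simp
    · exact pvMidInv_congr N t i _ vis hmid (fun r hr hrN hrt => by omega)
  | succ f ih =>
    intro i ans vis hfuel h0 hjN hmid
    by_cases hcond : 0 ≤ i ∧ 0 ≤ t - i ∧ i < N ∧ t - i < N
    · rw [markA, dif_pos hcond]
      have harg : t - i - 1 = t - (i + 1) := by ring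
      rw [harg]
      have hstep : pvMidInv N t (i + 1) (pvSet1 vis i (t - i)) := by
        refine ⟨pvShape_pvSet1 N vis hmid.1 i (t - i) (by omega) (by omega), ?_⟩
        intro r c hr hrN hc hcN
        rw [pvCell_pvSet1 N vis hmid.1 i (t - i) r c (by omega) (by omega) (by omega)
          (by omega) hr hrN hc hcN]
        by_cases hrc : r = i ∧ c = t - i
        · rw [if_pos hrc, if_pos (by omega)]
        · rw [if_neg hrc, hmid.2 r c hr hrN hc hcN]
          by_cases h1 : r + c < t
          · simp [h1]
          · by_cases h2 : r + c = t
            · have h3 : ¬(r = i) ∨ ¬(c = t - i) := by tauto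
              split_ifs <;> first | rfl | omega
            · simp [h1, h2]
      obtain ⟨vis', heq, hinv⟩ := ih (i + 1) (ans ++ [pvCell A i (t - i)])
        (pvSet1 vis i (t - i)) (by omega) (by omega) (by omega) hstep
      refine ⟨vis', ?_, hinv⟩
      rw [heq]
      conv_rhs => rw [PySem.List.pyRange_one_cons (show i < min (N - 1) t + 1 by omega)]
      simp
    · rw [markA, dif_neg hcond]
      refine ⟨vis, ?_, ?_⟩
      · rw [PySem.List.pyRange_one_eq_nil (by omega)]
        simp
      · exact pvMidInv_congr N t i _ vis hmid (fun r hr hrN hrt => by omega)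

def pvDiagInv (N t : Int) (vis : List (List Int)) : Prop :=
  pvShape N vis ∧ ∀ r c : Int, 0 ≤ r → r < N → 0 ≤ c → c < N →
    pvCell vis r c = if r + c < t then 1 else -1

theorem pvDiag_to_Mid (N t i : Int) (vis : List (List Int)) (h : pvDiagInv N t vis)
    (hi : i ≤ max 0 (t - N + 1)) : pvMidInv N t i vis := by
  refine ⟨h.1, fun r c hr hrN hc hcN => ?_⟩
  rw [h.2 r c hr hrN hc hcN]
  split_ifs <;> first | rfl | omega

theorem pvMid_to_Diag (N t i : Int) (vis : List (List Int)) (h : pvMidInv N t i vis)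
    (hi : min (N - 1) t < i) : pvDiagInv N (t + 1) vis := by
  refine ⟨h.1, fun r c hr hrN hc hcN => ?_⟩
  rw [h.2 r c hr hrN hc hcN]
  split_ifs <;> first | rfl | omega

theorem pvFoldl_append_replicate {β : Type} (row : β) :
    ∀ (l : List Int) (init : List β),
      l.foldl (fun acc _ => acc ++ [row]) init = init ++ List.replicate l.length row := by
  intro l
  induction l with
  | nil => simp
  | cons x xs ih =>
    intro init
    rw [List.foldl_cons, ih]
    simp [List.replicate_succ]

theorem pvVis0_inv (N : Int) :
    pvDiagInv N 0 ((PySem.List.pyRange 0 N 1).foldl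
      (fun acc _ => acc ++ [(PySem.List.pyRange 0 N 1).foldl (fun c _ => c ++ [(-1 : Int)]) []]) []) := by
  rw [pvFoldl_append_replicate, pvFoldl_append_replicate]
  simp only [List.nil_append, PySem.List.length_pyRange_one]
  have hlen : (N - 0).toNat = N.toNat := by omega
  rw [hlen]
  constructor
  · constructor
    · simp
    · intro row hrow
      simp [List.eq_of_mem_replicate hrow]
  · intro r c hr hrN hc hcN
    rw [pvCell_eq' _ _ _ hr (by simp; omega) hc ?hb]
    case hb =>
      rw [List.getD_eq_getElem _ _ (by simp; omega), List.getElem_replicate]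
      simp; omega
    have hout : (List.replicate N.toNat (List.replicate N.toNat (-1 : Int))).getD r.toNat []
        = List.replicate N.toNat (-1 : Int) := by
      rw [List.getD_eq_getElem _ _ (by simp; omega)]; simp
    rw [hout, List.getD_eq_getElem _ _ (by simp; omega), List.getElem_replicate,
        if_neg (by omega)]

def pvBody (A : List (List Int)) (N i : Int) (st : List (List Int) × List Int) (j : Int) :
    List (List Int) × List Int :=
  if pvCell st.1 i j == -1 then
    let p := markA A N i j [] st.1
    (p.2, st.2 ++ p.1)
  else st

def pvSeg (N : Int) (A : List (List Int)) (s : Int) : List Int :=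
  (PySem.List.pyRange (max 0 (s - N + 1)) (min (N - 1) s + 1) 1).map (fun i => pvCell A i (s - i))

def pvPart (N : Int) (A : List (List Int)) (t : Int) : List Int :=
  (PySem.List.pyRange 0 t 1).flatMap (fun s => pvSeg N A s)

theorem pvPart_succ (N : Int) (A : List (List Int)) (t : Int) (ht : 0 ≤ t) :
    pvPart N A (t + 1) = pvPart N A t ++ pvSeg N A t := by
  unfold pvPart
  rw [PySem.List.pyRange_one_succ_right ht, List.flatMap_append]
  simp

theorem pvRow0 (A : List (List Int)) (N : Int) :
    ∀ (k : Nat) (vis : List (List Int)) (rans : List Int), (k : Int) ≤ N → pvDiagInv N 0 vis →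
      ∃ vis', (PySem.List.pyRange 0 (k : Int) 1).foldl (pvBody A N 0) (vis, rans)
          = (vis', rans ++ pvPart N A k) ∧ pvDiagInv N (k : Int) vis' := by
  intro k
  induction k with
  | zero =>
    intro vis rans _ h0
    refine ⟨vis, ?_, by simpa using h0⟩
    simp [pvPart]
  | succ k ih =>
    intro vis rans hkN h0
    have hk : (0 : Int) ≤ k := by omega
    have hcast : ((k + 1 : Nat) : Int) = (k : Int) + 1 := by push_cast; ring
    rw [hcast, PySem.List.pyRange_one_succ_right hk, List.foldl_append]
    obtain ⟨vis1, heq1, hinv1⟩ := ih vis rans (by omega) h0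
    rw [heq1]
    -- the body at j = k marks diagonal k
    have hNpos : (0 : Int) < N := by omega
    have hkltN : (k : Int) < N := by omega
    have hcell : pvCell vis1 0 (k : Int) = -1 := by
      rw [hinv1.2 0 k (by omega) hNpos (by omega) hkltN, if_neg (by omega)]
    have hmid : pvMidInv N (k : Int) 0 vis1 :=
      pvDiag_to_Mid N k 0 vis1 hinv1 (by omega)
    obtain ⟨vis2, heq2, hinv2⟩ := markA_run A N (k : Int) (N - 0).toNat 0 [] vis1
      (by omega) (by omega) (by omega) hmid
    have hmark : markA A N 0 (k : Int) [] vis1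
        = ((PySem.List.pyRange 0 (min (N - 1) (k : Int) + 1) 1).map (fun r => pvCell A r ((k : Int) - r)), vis2) := by
      have h00 : (k : Int) = (k : Int) - 0 := by ring
      rw [h00] at heq2 ⊢
      simpa using heq2
    refine ⟨vis2, ?_, ?_⟩
    · simp only [List.foldl_cons, List.foldl_nil, pvBody, hcell]
      rw [if_pos (by decide), hmark]
      simp only
      rw [pvPart_succ N A k hk, pvSeg]
      have h1 : max 0 ((k : Int) - N + 1) = 0 := by omega
      have h2 : min (N - 1) (k : Int) = (k : Int) := by omega
      rw [h1, h2]
      simp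
    · have := pvMid_to_Diag N (k : Int) (min (N - 1) (k : Int) + 1) vis2 hinv2 (by omega)
      simpa using this

theorem pvRowSkip (A : List (List Int)) (N i : Int) (hi : 1 ≤ i) (hiN : i < N) :
    ∀ (k : Nat) (vis : List (List Int)) (rans : List Int), (k : Int) ≤ N - 1 →
      pvDiagInv N (N - 1 + i) vis →
      (PySem.List.pyRange 0 (k : Int) 1).foldl (pvBody A N i) (vis, rans) = (vis, rans) := by
  intro k
  induction k with
  | zero => intro vis rans _ _; simp
  | succ k ih =>
    intro vis rans hkN h0
    have hk : (0 : Int) ≤ k := by omega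
    have hcast : ((k + 1 : Nat) : Int) = (k : Int) + 1 := by push_cast; ring
    rw [hcast, PySem.List.pyRange_one_succ_right hk, List.foldl_append, ih vis rans (by omega) h0]
    have hcell : pvCell vis i (k : Int) = 1 := by
      rw [h0.2 i k (by omega) hiN (by omega) (by omega), if_pos (by omega)]
    simp only [List.foldl_cons, List.foldl_nil, pvBody, hcell]
    rw [if_neg (by decide)]

theorem pvRowFull (A : List (List Int)) (N i : Int) (hi : 1 ≤ i) (hiN : i < N)
    (vis : List (List Int)) (rans : List Int) (h : pvDiagInv N (N - 1 + i) vis) :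
    ∃ vis', (PySem.List.pyRange 0 N 1).foldl (pvBody A N i) (vis, rans)
        = (vis', rans ++ pvSeg N A (N - 1 + i)) ∧ pvDiagInv N (N + i) vis' := by
  have hsplit : PySem.List.pyRange 0 N 1
      = PySem.List.pyRange 0 (N - 1) 1 ++ PySem.List.pyRange (N - 1) N 1 :=
    PySem.List.pyRange_one_append 0 (N - 1) N (by omega) (by omega)
  have hlast : PySem.List.pyRange (N - 1) N 1 = [N - 1] := by
    have h := PySem.List.pyRange_one_singleton (a := N - 1)
    rw [show N - 1 + 1 = N by ring] at h
    exact h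
  have hskip : (PySem.List.pyRange 0 (N - 1) 1).foldl (pvBody A N i) (vis, rans) = (vis, rans) := by
    have hc : ((N - 1).toNat : Int) = N - 1 := by omega
    have := pvRowSkip A N i hi hiN (N - 1).toNat vis rans (by omega) h
    rw [hc] at this
    exact this
  rw [hsplit, List.foldl_append, hskip, hlast]
  have hcell : pvCell vis i (N - 1) = -1 := by
    rw [h.2 i (N - 1) (by omega) hiN (by omega) (by omega), if_neg (by omega)]
  have hmid : pvMidInv N (N - 1 + i) i vis :=
    pvDiag_to_Mid N (N - 1 + i) i vis h (by omega)
  obtain ⟨vis2, heq2, hinv2⟩ := markA_run A N (N - 1 + i) (N - i).toNat i [] vis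
    (by omega) (by omega) (by omega) hmid
  have hmark : markA A N i (N - 1) [] vis
      = ((PySem.List.pyRange i (min (N - 1) (N - 1 + i) + 1) 1).map (fun r => pvCell A r ((N - 1 + i) - r)), vis2) := by
    have h00 : N - 1 = (N - 1 + i) - i := by ring
    rw [h00]
    simpa using heq2
  refine ⟨vis2, ?_, ?_⟩
  · simp only [List.foldl_cons, List.foldl_nil, pvBody, hcell]
    rw [if_pos (by decide), hmark]
    simp only
    rw [pvSeg]
    have h1 : max 0 ((N - 1 + i) - N + 1) = i := by omega
    have h2 : min (N - 1) (N - 1 + i) = N - 1 := by omega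
    rw [h1, h2]
  · have := pvMid_to_Diag N (N - 1 + i) (min (N - 1) (N - 1 + i) + 1) vis2 hinv2 (by omega)
    have harith : N - 1 + i + 1 = N + i := by ring
    rwa [harith] at this

theorem pvOuter (A : List (List Int)) (N : Int) :
    ∀ (k : Nat), 1 ≤ k → (k : Int) ≤ N →
      ∀ (vis : List (List Int)), pvDiagInv N 0 vis →
      ∃ vis', (PySem.List.pyRange 0 (k : Int) 1).foldl
          (fun st i => (PySem.List.pyRange 0 N 1).foldl (pvBody A N i) st) (vis, [])
          = (vis', pvPart N A (N - 1 + k)) ∧ pvDiagInv N (N - 1 + k) vis' := by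
  intro k
  induction k with
  | zero => intro h; omega
  | succ k ih =>
    intro _ hkN vis h0
    by_cases hk0 : k = 0
    · subst hk0
      have hone : PySem.List.pyRange 0 ((1 : Nat) : Int) 1 = [0] := by
        rw [show ((1 : Nat) : Int) = (0 : Int) + 1 by norm_num]
        exact PySem.List.pyRange_one_singleton 0
      rw [hone]
      simp only [List.foldl_cons, List.foldl_nil]
      have hNc : ((N.toNat : Nat) : Int) = N := by omega
      obtain ⟨vis', heq, hinv⟩ := pvRow0 A N N.toNat vis [] (by omega) h0
      rw [hNc] at heq hinv
      refine ⟨vis', ?_, by simpa using hinv⟩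
      rw [heq]
      simp
    · have hk1 : 1 ≤ k := by omega
      have hcast : ((k + 1 : Nat) : Int) = (k : Int) + 1 := by push_cast; ring
      have hk : (0 : Int) ≤ k := by omega
      rw [hcast, PySem.List.pyRange_one_succ_right hk, List.foldl_append]
      obtain ⟨vis1, heq1, hinv1⟩ := ih hk1 (by omega) vis h0
      rw [heq1]
      simp only [List.foldl_cons, List.foldl_nil]
      obtain ⟨vis2, heq2, hinv2⟩ := pvRowFull A N k (by exact_mod_cast hk1) (by omega) vis1 (pvPart N A (N - 1 + k)) hinv1
      refine ⟨vis2, ?_, ?_⟩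
      · rw [heq2, ← pvPart_succ N A (N - 1 + k) (by omega)]
        have : N - 1 + (k : Int) + 1 = N - 1 + ((k : Int) + 1) := by ring
        rw [this]
      · have : N + (k : Int) = N - 1 + ((k : Int) + 1) := by ring
        rwa [this] at hinv2

theorem pvMain (N : Int) (A : List (List Int)) : downwardDigonal N A = downwardDigonal_alt N A := by
  by_cases hN : N ≤ 0
  · unfold downwardDigonal downwardDigonal_alt
    rw [PySem.List.pyRange_one_eq_nil (show N ≤ 0 from hN),
        PySem.List.pyRange_one_eq_nil (show (2 * N - 1 : Int) ≤ 0 by omega)]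
    simp
  · have hN1 : (1 : Int) ≤ N := by omega
    obtain ⟨vis', heq, _⟩ := pvOuter A N N.toNat (by omega) (by omega) _ (pvVis0_inv N)
    have hcast : ((N.toNat : Nat) : Int) = N := by omega
    rw [hcast] at heq
    show (((PySem.List.pyRange 0 N 1).foldl
        (fun st i => (PySem.List.pyRange 0 N 1).foldl (pvBody A N i) st)
        ((PySem.List.pyRange 0 N 1).foldl
          (fun acc _ => acc ++ [(PySem.List.pyRange 0 N 1).foldl (fun c _ => c ++ [(-1 : Int)]) []]) [],
         ([] : List Int))).2) = downwardDigonal_alt N A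
    rw [heq]
    show pvPart N A (N - 1 + N) = downwardDigonal_alt N A
    rw [show N - 1 + N = 2 * N - 1 by ring]
    rfl

-- ===== VERDICT (by name: the statement is the Claim_ definition above) =====
theorem downwardDigonal_spec : Claim_equal_downwardDigonal := by
  intro N A _ _
  unfold Spec_downwardDigonal
  exact pvMain N A
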